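-- pv_equiv track=rewrite | github.com/andreiario/FlixData | crossovers.py | check_no_repeated_cities
-- ===== SOURCE A (Python) =====
-- def check_no_repeated_cities(offspring):
--     for i, route in enumerate(offspring):
--         city_count = {}
--         for city in route:
--             if city is not None:
--                 city_count[city] = city_count.get(city, 0) + 1
--                 if city_count[city] > 1:
--                     return False
--     return True
-- ===== SOURCE B (Python) =====
-- def check_no_repeated_cities(offspring):
--     for route in offspring:
--         cities = sorted(c for c in route if c is not None)
--         if any(x == y for x, y in zip(cities, cities[1:])):
--             return False
--     return True
-- ===== Notes on version B (the rewrite author's own statement) =====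
-- stated objective: alternative
-- what changed: Replaces A's incremental hash-counter duplicate detection by sort-then-adjacent-scan: each route's non-None cities are sorted and duplication is decided by comparing consecutive elements, with no dictionary or counting at all.
import Mathlib
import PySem

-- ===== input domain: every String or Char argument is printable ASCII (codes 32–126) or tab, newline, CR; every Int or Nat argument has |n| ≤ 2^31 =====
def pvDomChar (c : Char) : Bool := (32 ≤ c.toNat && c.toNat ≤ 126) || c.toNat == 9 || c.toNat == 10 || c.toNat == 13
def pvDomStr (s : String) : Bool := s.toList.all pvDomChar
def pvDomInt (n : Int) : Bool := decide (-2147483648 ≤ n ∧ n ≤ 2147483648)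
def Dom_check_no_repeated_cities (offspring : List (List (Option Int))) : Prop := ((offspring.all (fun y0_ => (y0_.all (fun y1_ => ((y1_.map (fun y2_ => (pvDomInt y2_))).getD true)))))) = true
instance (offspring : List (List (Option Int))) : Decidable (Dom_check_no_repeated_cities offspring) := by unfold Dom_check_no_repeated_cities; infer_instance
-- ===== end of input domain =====

-- B replaces A's hash-counter duplicate detection by sort-then-adjacent-scan per route (objective: alternative).

-- ===== PORT A =====
-- inner 'for city in route' loop of A, carrying the city_count dict; false = A's early 'return False'
def pvRouteLoop (d : PySem.Dict Int Int) : List (Option Int) → Bool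
  | [] => true
  | c :: rest =>
    match c with
    | none => pvRouteLoop d rest
    | some city =>
      let d' := d.insert city (d.getD city 0 + 1)
      if d'.getD city 0 > 1 then false else pvRouteLoop d' rest

def check_no_repeated_cities : List (List (Option Int)) → Bool
  | [] => true
  | route :: rest =>
    if pvRouteLoop PySem.Dict.empty route then check_no_repeated_cities rest else false

-- ===== PORT B =====
-- any(x == y for x, y in zip(cities, cities[1:])) : adjacent-pair scan
def pvHasAdjDup : List Int → Bool
  | x :: y :: rest => x == y || pvHasAdjDup (y :: rest)
  | _ => false

def check_no_repeated_cities_alt : List (List (Option Int)) → Bool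
  | [] => true
  | route :: rest =>
    let cities := PySem.List.sorted (route.filterMap id) (fun x => x) false
    if pvHasAdjDup cities then false else check_no_repeated_cities_alt rest

-- ===== PRECONDITION & SPEC =====
def Spec_check_no_repeated_cities (offspring : List (List (Option Int))) (out : Bool) : Prop := out = check_no_repeated_cities_alt offspring
instance (offspring : List (List (Option Int))) (out : Bool) : Decidable (Spec_check_no_repeated_cities offspring out) := by unfold Spec_check_no_repeated_cities; infer_instance

-- ===== CLAIM =====
def Claim_equal_check_no_repeated_cities : Prop := ∀ (offspring : List (List (Option Int))), Dom_check_no_repeated_cities offspring → Spec_check_no_repeated_cities offspring (check_no_repeated_cities offspring)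

-- ===== LEMMAS AND PROOFS =====

-- A's inner loop returns true iff the non-None cities are distinct and none was already counted in d
lemma pvRouteLoop_iff (rest : List (Option Int)) (d : PySem.Dict Int Int)
    (hd : ∀ c : Int, 0 ≤ d.getD c 0) :
    pvRouteLoop d rest = true ↔
      ((rest.filterMap id).Nodup ∧ ∀ c ∈ rest.filterMap id, d.getD c 0 = 0) := by
  induction rest generalizing d with
  | nil => simp [pvRouteLoop]
  | cons c rest ih =>
    cases c with
    | none => simpa [pvRouteLoop] using ih d hd
    | some city =>
      have hins : ∀ c' : Int,
          (d.insert city (d.getD city 0 + 1)).getD c' 0 =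
            if c' = city then d.getD city 0 + 1 else d.getD c' 0 := by
        intro c'; exact PySem.Dict.getD_insert d city c' _ 0
      have hfm : List.filterMap id (some city :: rest) = city :: List.filterMap id rest := by
        simp
      by_cases hpos : d.getD city 0 + 1 > 1
      · have hcond : (d.insert city (d.getD city 0 + 1)).getD city 0 > 1 := by
          rw [hins city]; simpa using hpos
        have hfalse : pvRouteLoop d (some city :: rest) = false := by
          simp only [pvRouteLoop]; rw [if_pos hcond]
        rw [hfalse, hfm]
        simp only [Bool.false_eq_true, false_iff, not_and]
        intro _ hall
        have := hall city (by simp)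
        omega
      · have hz : d.getD city 0 = 0 := le_antisymm (by omega) (hd city)
        have hd' : ∀ c' : Int, 0 ≤ (d.insert city (d.getD city 0 + 1)).getD c' 0 := by
          intro c'; rw [hins]; split <;> [omega; exact hd c']
        have hstep : pvRouteLoop d (some city :: rest) =
            pvRouteLoop (d.insert city (d.getD city 0 + 1)) rest := by
          have hcond : ¬ (d.insert city (d.getD city 0 + 1)).getD city 0 > 1 := by
            rw [hins city]; simpa using hpos
          simp only [pvRouteLoop]; rw [if_neg hcond]
        rw [hstep, hfm, ih _ hd']
        simp only [List.nodup_cons, List.mem_cons]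
        constructor
        · rintro ⟨hnd, hall⟩
          have hnotmem : city ∉ rest.filterMap id := by
            intro hmem
            have := hall city hmem
            rw [hins] at this; simp at this; omega
          refine ⟨⟨hnotmem, hnd⟩, ?_⟩
          intro c' hc'
          rcases hc' with h | h
          · subst h; exact hz
          · have := hall c' h
            rw [hins] at this
            rcases eq_or_ne c' city with he | he
            · subst he; exact hz
            · simpa [he] using this
        · rintro ⟨⟨hnotmem, hnd⟩, hall⟩
          refine ⟨hnd, ?_⟩
          intro c' hc'
          rw [hins]
          have hne : c' ≠ city := fun he => hnotmem (he ▸ hc')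
          simp [hne]
          exact hall c' (Or.inr hc')

-- on a ≤-sorted list, no adjacent duplicate iff Nodup
lemma pvAdjDup_false_iff (l : List Int) (h : l.Pairwise (· ≤ ·)) :
    pvHasAdjDup l = false ↔ l.Nodup := by
  induction l with
  | nil => simp [pvHasAdjDup]
  | cons x t ih =>
    cases t with
    | nil => simp [pvHasAdjDup]
    | cons y rest =>
      have hx : x ≤ y ∧ ∀ z ∈ rest, x ≤ z := by
        rcases List.pairwise_cons.mp h with ⟨hall, _⟩
        exact ⟨hall y (by simp), fun z hz => hall z (by simp [hz])⟩
      have ht : (y :: rest).Pairwise (· ≤ ·) := (List.pairwise_cons.mp h).2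
      have hyr : ∀ z ∈ rest, y ≤ z := fun z hz => (List.pairwise_cons.mp ht).1 z hz
      rw [show pvHasAdjDup (x :: y :: rest) = (x == y || pvHasAdjDup (y :: rest)) from rfl]
      simp only [Bool.or_eq_false_iff, beq_eq_false_iff_ne, ih ht, List.nodup_cons,
        List.mem_cons]
      constructor
      · rintro ⟨hne, hnd⟩
        refine ⟨?_, hnd⟩
        rintro (he | hmem)
        · exact hne he
        · have hlt : x < y := lt_of_le_of_ne hx.1 hne
          have := hyr x hmem
          omega
      · rintro ⟨hnm, hnd⟩
        exact ⟨fun he => hnm (Or.inl he), hnd⟩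

-- the two per-route tests agree as Bools
lemma pvRoute_eq (route : List (Option Int)) :
    pvRouteLoop PySem.Dict.empty route =
      !pvHasAdjDup (PySem.List.sorted (route.filterMap id) (fun x => x) false) := by
  rw [Bool.eq_iff_iff]
  have hperm : (PySem.List.sorted (route.filterMap id) (fun x => x) false).Perm (route.filterMap id) :=
    PySem.List.sorted_perm _ _ _
  have hpw : (PySem.List.sorted (route.filterMap id) (fun x => x) false).Pairwise (· ≤ ·) := by
    simpa using PySem.List.sorted_pairwise (route.filterMap id) (fun x => x)
  rw [pvRouteLoop_iff _ _ (fun c => by simp [PySem.Dict.getD_empty]),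
      Bool.not_eq_eq_eq_not, Bool.not_true, pvAdjDup_false_iff _ hpw, hperm.nodup_iff]
  simp [PySem.Dict.getD_empty]

lemma pvMain (offspring : List (List (Option Int))) :
    check_no_repeated_cities offspring = check_no_repeated_cities_alt offspring := by
  induction offspring with
  | nil => rfl
  | cons route rest ih =>
    simp only [check_no_repeated_cities, check_no_repeated_cities_alt]
    rw [pvRoute_eq route, ih]
    cases pvHasAdjDup (PySem.List.sorted (route.filterMap id) (fun x => x) false) <;> simp

-- ===== VERDICT =====
theorem check_no_repeated_cities_spec : Claim_equal_check_no_repeated_cities := by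
  intro offspring _
  exact pvMain offspring
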